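-- pv_equiv track=rewrite | github.com/JohnNDvorak/przz-extension | archive/superseded_evaluators/section7_pconfig_engine.py | generate_pconfigs
-- ===== SOURCE A (Python) =====
-- from math import factorial, comb, log, exp
-- from typing import Tuple, Dict, List, NamedTuple
--
-- class PConfigTerm(NamedTuple):
--     """A p-configuration term in the Ψ expansion."""
--     p: int
--     coeff: int  # C(ℓ,p) × C(ℓ̄,p) × p!
--     x_power: int  # ℓ - p
--     y_power: int  # ℓ̄ - p
--
-- def generate_pconfigs(ell: int, ellbar: int) -> List[PConfigTerm]:
--     """
--     Generate all p-config terms for pair (ℓ, ℓ̄).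
--
--     Ψ_{ℓ,ℓ̄} = Σ_{p=0}^{min(ℓ,ℓ̄)} C(ℓ,p)C(ℓ̄,p)p! × Z^p × X^{ℓ-p} × Y^{ℓ̄-p}
--     """
--     configs = []
--     max_p = min(ell, ellbar)
--
--     for p in range(max_p + 1):
--         coeff = comb(ell, p) * comb(ellbar, p) * factorial(p)
--         configs.append(PConfigTerm(
--             p=p,
--             coeff=int(coeff),
--             x_power=ell - p,
--             y_power=ellbar - p
--         ))
--
--     return configs
-- ===== SOURCE B (Python) =====
-- from typing import NamedTuple
--
-- class PConfigTerm(NamedTuple):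
--     """A p-configuration term in the Psi expansion."""
--     p: int
--     coeff: int
--     x_power: int
--     y_power: int
--
-- def generate_pconfigs(ell: int, ellbar: int):
--     """Generate all p-config terms for pair (ell, ellbar) by the incremental
--     recurrence coeff(p) = coeff(p-1) * (ell-p+1) * (ellbar-p+1) // p,
--     avoiding any binomial/factorial computation per term."""
--     configs = []
--     max_p = min(ell, ellbar)
--     coeff = 1
--     p = 0
--     while p <= max_p:
--         configs.append(PConfigTerm(p=p, coeff=coeff, x_power=ell - p, y_power=ellbar - p))
--         p += 1
--         coeff = coeff * (ell - p + 1) * (ellbar - p + 1) // p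
--     return configs
-- ===== Notes on version B (the rewrite author's own statement) =====
-- stated objective: faster
-- what changed: Replaces the per-term comb(ell,p)*comb(ellbar,p)*factorial(p) evaluation by a single running coefficient updated with the exact recurrence coeff(p)=coeff(p-1)*(ell-p+1)*(ellbar-p+1)//p.
import Mathlib
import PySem

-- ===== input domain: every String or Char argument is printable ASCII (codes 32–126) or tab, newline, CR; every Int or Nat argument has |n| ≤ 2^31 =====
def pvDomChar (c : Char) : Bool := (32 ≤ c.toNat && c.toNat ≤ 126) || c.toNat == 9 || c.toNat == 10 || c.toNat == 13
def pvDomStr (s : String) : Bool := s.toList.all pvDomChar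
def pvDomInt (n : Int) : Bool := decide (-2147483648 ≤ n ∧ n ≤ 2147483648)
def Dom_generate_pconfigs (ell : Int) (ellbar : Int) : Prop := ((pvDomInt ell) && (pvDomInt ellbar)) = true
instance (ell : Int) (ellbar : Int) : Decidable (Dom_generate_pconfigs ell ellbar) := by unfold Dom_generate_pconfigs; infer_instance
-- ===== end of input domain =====

-- B replaces A's per-term comb/factorial products by one running coefficient
-- updated with the exact recurrence coeff(p) = coeff(p-1)*(ell-p+1)*(ellbar-p+1)//p  (objective: faster).

-- ===== PORT A =====
-- comb/factorial: the loop body only runs for 0 ≤ p ≤ ell, ellbar, where Python's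
-- comb(n, k) = Nat.choose n.toNat k.toNat and factorial(p) = Nat.factorial p.toNat exactly.
def generate_pconfigs (ell : Int) (ellbar : Int) : List (Int × Int × Int × Int) :=
  (PySem.List.pyRange 0 (min ell ellbar + 1) 1).foldl
    (fun configs p =>
      configs ++ [(p,
        ((Nat.choose ell.toNat p.toNat * Nat.choose ellbar.toNat p.toNat * Nat.factorial p.toNat : Nat) : Int),
        ell - p, ellbar - p)])
    []

-- ===== PORT B =====
-- the while loop of Source B: fuel = number of remaining iterations, state (p, coeff)
def pvAltLoop (ell : Int) (ellbar : Int) : Nat → Int → Int → List (Int × Int × Int × Int)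
  | 0, _, _ => []
  | n + 1, p, coeff =>
      (p, coeff, ell - p, ellbar - p) ::
        pvAltLoop ell ellbar n (p + 1)
          (PySem.Int.floordiv (coeff * (ell - (p + 1) + 1) * (ellbar - (p + 1) + 1)) (p + 1))

def generate_pconfigs_alt (ell : Int) (ellbar : Int) : List (Int × Int × Int × Int) :=
  pvAltLoop ell ellbar ((min ell ellbar + 1).toNat) 0 1

-- ===== PRECONDITION & SPEC =====
def Spec_generate_pconfigs (ell : Int) (ellbar : Int) (out : List (Int × Int × Int × Int)) : Prop := out = generate_pconfigs_alt ell ellbar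
instance (ell : Int) (ellbar : Int) (out : List (Int × Int × Int × Int)) : Decidable (Spec_generate_pconfigs ell ellbar out) := by unfold Spec_generate_pconfigs; infer_instance

-- ===== CLAIM (what is proved, stated in full; the proofs are below) =====
def Claim_equal_generate_pconfigs : Prop := ∀ (ell : Int) (ellbar : Int), Dom_generate_pconfigs ell ellbar → Spec_generate_pconfigs ell ellbar (generate_pconfigs ell ellbar)

-- ===== LEMMAS AND PROOFS =====

/-- the coefficient C(a,p) C(b,p) p!, as an integer -/
def pvF (a b p : Nat) : Int := ((Nat.choose a p * Nat.choose b p * Nat.factorial p : Nat) : Int)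

/-- Nat form of the recurrence. -/
lemma pvF_nat (a b p : Nat) :
    Nat.choose a p * Nat.choose b p * Nat.factorial p * (a - p) * (b - p)
      = Nat.choose a (p + 1) * Nat.choose b (p + 1) * Nat.factorial (p + 1) * (p + 1) := by
  have ha := Nat.choose_succ_right_eq a p
  have hb := Nat.choose_succ_right_eq b p
  calc Nat.choose a p * Nat.choose b p * Nat.factorial p * (a - p) * (b - p)
      = (Nat.choose a p * (a - p)) * (Nat.choose b p * (b - p)) * Nat.factorial p := by ring
    _ = (Nat.choose a (p + 1) * (p + 1)) * (Nat.choose b (p + 1) * (p + 1)) * Nat.factorial p := by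
        rw [ha, hb]
    _ = Nat.choose a (p + 1) * Nat.choose b (p + 1) * Nat.factorial (p + 1) * (p + 1) := by
        rw [Nat.factorial_succ]; ring

/-- Int recurrence, valid while p ≤ a and p ≤ b. -/
lemma pvF_rec (a b p : Nat) (hpa : p ≤ a) (hpb : p ≤ b) :
    pvF a b p * ((a : Int) - p) * ((b : Int) - p) = pvF a b (p + 1) * (p + 1) := by
  have h1 : ((a : Int) - p) = ((a - p : Nat) : Int) := by
    omega
  have h2 : ((b : Int) - p) = ((b - p : Nat) : Int) := by
    omega
  rw [pvF, pvF, h1, h2]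
  push_cast
  rw [← Nat.cast_mul, ← Nat.cast_mul]
  exact_mod_cast congrArg (Nat.cast (R := Int)) (pvF_nat a b p)

lemma pv_floordiv_exact (x q : Int) (hq : 0 < q) :
    PySem.Int.floordiv (x * q) q = x := by
  rw [PySem.Int.floordiv_eq_ediv_of_pos]
  · exact Int.mul_ediv_cancel x (by omega)
  · exact hq

/-- Invariant of B's loop: starting at index p with the true coefficient, it emits
    the terms for p, p+1, …, p+n-1. -/
lemma pvAltLoop_eq (a b : Nat) (n p : Nat) (h : p + n ≤ min a b + 1) :
    pvAltLoop (a : Int) (b : Int) n (p : Int) (pvF a b p)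
      = (List.range n).map (fun i =>
          (((p + i : Nat) : Int), pvF a b (p + i), (a : Int) - (p + i : Nat), (b : Int) - (p + i : Nat))) := by
  induction n generalizing p with
  | zero => simp [pvAltLoop]
  | succ n ih =>
    have hpa : p ≤ a := by omega
    have hpb : p ≤ b := by omega
    have hco : PySem.Int.floordiv
        (pvF a b p * ((a : Int) - ((p : Int) + 1) + 1) * ((b : Int) - ((p : Int) + 1) + 1)) ((p : Int) + 1)
        = pvF a b (p + 1) := by
      have e1 : ((a : Int) - ((p : Int) + 1) + 1) = (a : Int) - p := by ring
      have e2 : ((b : Int) - ((p : Int) + 1) + 1) = (b : Int) - p := by ring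
      rw [e1, e2, pvF_rec a b p hpa hpb]
      have : ((p : Int) + 1) = ((p + 1 : Nat) : Int) := by push_cast; ring
      rw [this]
      exact pv_floordiv_exact _ _ (by positivity)
    rw [pvAltLoop, hco]
    have hcast : ((p : Int) + 1) = ((p + 1 : Nat) : Int) := by push_cast; ring
    rw [hcast, ih (p + 1) (by omega)]
    rw [List.range_succ_eq_map]
    simp only [List.map_cons, List.map_map]
    refine congrArg₂ _ (by simp) ?_
    refine List.map_congr_left (fun i _ => ?_)
    simp only [Function.comp, Nat.succ_eq_add_one]
    have hpi : p + 1 + i = p + (i + 1) := by omega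
    rw [hpi]

/-- A's foldl-append loop is a map over the range. -/
lemma pvA_eq_map (ell ellbar : Int) :
    generate_pconfigs ell ellbar
      = (PySem.List.pyRange 0 (min ell ellbar + 1) 1).map
          (fun p => (p,
            ((Nat.choose ell.toNat p.toNat * Nat.choose ellbar.toNat p.toNat * Nat.factorial p.toNat : Nat) : Int),
            ell - p, ellbar - p)) := by
  unfold generate_pconfigs
  rw [PySem.List.foldl_append_singleton_eq_map]
  simp

-- ===== VERDICT (by name: the statement is the Claim_ definition above) =====
theorem generate_pconfigs_spec : Claim_equal_generate_pconfigs := by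
  intro ell ellbar _
  unfold Spec_generate_pconfigs generate_pconfigs_alt
  rw [pvA_eq_map]
  by_cases hneg : min ell ellbar + 1 ≤ 0
  · rw [PySem.List.pyRange_one_eq_nil (by omega)]
    have : (min ell ellbar + 1).toNat = 0 := by omega
    rw [this]
    simp [pvAltLoop]
  · -- both ell and ellbar are nonnegative
    have hell : 0 ≤ ell := by omega
    have hbar : 0 ≤ ellbar := by omega
    set a := ell.toNat with ha
    set b := ellbar.toNat with hb
    have hea : ell = (a : Int) := by omega
    have heb : ellbar = (b : Int) := by omega
    have hmin : min ell ellbar = ((min a b : Nat) : Int) := by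
      rw [hea, heb]; omega
    have hM : (min ell ellbar + 1).toNat = min a b + 1 := by omega
    rw [hM, hea, heb]
    conv_rhs => rw [show (0 : Int) = ((0 : Nat) : Int) by norm_num,
                    show (1 : Int) = pvF a b 0 by simp [pvF]]
    rw [pvAltLoop_eq a b (min a b + 1) 0 (by omega)]
    have hmin' : min ((a : Nat) : Int) ((b : Nat) : Int) = ((min a b : Nat) : Int) := by omega
    rw [hmin', PySem.List.pyRange_one]
    have htn : (((min a b : Nat) : Int) + 1 - 0).toNat = min a b + 1 := by omega
    rw [htn, List.map_map]
    refine List.map_congr_left (fun i hi => ?_)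
    simp only [Function.comp, zero_add]
    have hto : ((i : Int)).toNat = i := by omega
    simp [pvF, hto]
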